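-- pv_equiv track=rewrite | github.com/Roddyw123/klee123 | tools/corpus2template.py | infer_constraint
-- ===== SOURCE A (Python) =====
-- def infer_constraint(values):
--     """Given a set of byte values, infer the tightest constraint."""
--     if all(0x30 <= v <= 0x39 for v in values):
--         return 'digit'
--     if all((0x41 <= v <= 0x5A) or (0x61 <= v <= 0x7A) for v in values):
--         return 'alpha'
--     if all((0x41 <= v <= 0x5A) or (0x61 <= v <= 0x7A) or
--            (0x30 <= v <= 0x39) for v in values):
--         return 'alnum'
--     if all(0x20 <= v <= 0x7E for v in values):
--         return 'print'
--     lo, hi = min(values), max(values)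
--     if hi - lo < 64:
--         return f'range:{lo}-{hi}'
--     return None
-- ===== SOURCE B (Python) =====
-- def infer_constraint(values):
--     """Given a set of byte values, infer the tightest constraint."""
--     all_digit = all_alpha = all_alnum = all_print = True
--     lo = hi = None
--     for v in values:
--         if not (0x30 <= v <= 0x39):
--             all_digit = False
--         if not (0x41 <= v <= 0x5A or 0x61 <= v <= 0x7A):
--             all_alpha = False
--         if not (0x41 <= v <= 0x5A or 0x61 <= v <= 0x7A or 0x30 <= v <= 0x39):
--             all_alnum = False
--         if not (0x20 <= v <= 0x7E):
--             all_print = False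
--         if lo is None or v < lo:
--             lo = v
--         if hi is None or v > hi:
--             hi = v
--     if all_digit:
--         return 'digit'
--     if all_alpha:
--         return 'alpha'
--     if all_alnum:
--         return 'alnum'
--     if all_print:
--         return 'print'
--     if hi - lo < 64:
--         return f'range:{lo}-{hi}'
--     return None
-- ===== Notes on version B (the rewrite author's own statement) =====
-- stated objective: alternative
-- what changed: Replaces A's four separate all() passes plus min()/max() passes (up to six traversals) with one single loop that maintains four boolean flags and running lo/hi, then the same priority cascade.
import Mathlib
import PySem

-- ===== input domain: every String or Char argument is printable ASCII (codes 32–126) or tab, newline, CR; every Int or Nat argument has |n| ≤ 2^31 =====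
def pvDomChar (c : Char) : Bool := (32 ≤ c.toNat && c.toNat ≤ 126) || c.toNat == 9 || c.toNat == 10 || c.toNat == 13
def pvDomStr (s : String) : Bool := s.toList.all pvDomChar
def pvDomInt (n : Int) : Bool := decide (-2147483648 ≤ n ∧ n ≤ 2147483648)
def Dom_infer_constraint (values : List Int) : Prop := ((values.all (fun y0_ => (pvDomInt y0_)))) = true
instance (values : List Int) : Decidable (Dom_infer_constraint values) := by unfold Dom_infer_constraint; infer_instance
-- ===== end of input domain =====

-- B folds the list once into four flags plus running lo/hi instead of A's repeated all()/min()/max() passes; same cascade and values.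

-- ===== PORT A =====
def infer_constraint (values : List Int) : Option String :=
  if values.all (fun v => decide (0x30 ≤ v ∧ v ≤ 0x39)) then some "digit"
  else if values.all (fun v => decide ((0x41 ≤ v ∧ v ≤ 0x5A) ∨ (0x61 ≤ v ∧ v ≤ 0x7A))) then some "alpha"
  else if values.all (fun v => decide ((0x41 ≤ v ∧ v ≤ 0x5A) ∨ (0x61 ≤ v ∧ v ≤ 0x7A) ∨ (0x30 ≤ v ∧ v ≤ 0x39))) then some "alnum"
  else if values.all (fun v => decide (0x20 ≤ v ∧ v ≤ 0x7E)) then some "print"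
  else
    -- lo, hi = min(values), max(values): the none arm is unreachable here (the list is nonempty, else the first branch fired)
    match PySem.List.min? values (fun y => y), PySem.List.max? values (fun y => y) with
    | some lo, some hi =>
        if hi - lo < 64 then some ("range:" ++ PySem.Int.toStr lo ++ "-" ++ PySem.Int.toStr hi)
        else none
    | _, _ => none

-- ===== PORT B =====
structure IcState where
  allDigit : Bool
  allAlpha : Bool
  allAlnum : Bool
  allPrint : Bool
  lo : Option Int
  hi : Option Int
deriving DecidableEq, Repr

def icStep (s : IcState) (v : Int) : IcState :=
  { allDigit := s.allDigit && decide (0x30 ≤ v ∧ v ≤ 0x39)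
    allAlpha := s.allAlpha && decide ((0x41 ≤ v ∧ v ≤ 0x5A) ∨ (0x61 ≤ v ∧ v ≤ 0x7A))
    allAlnum := s.allAlnum && decide ((0x41 ≤ v ∧ v ≤ 0x5A) ∨ (0x61 ≤ v ∧ v ≤ 0x7A) ∨ (0x30 ≤ v ∧ v ≤ 0x39))
    allPrint := s.allPrint && decide (0x20 ≤ v ∧ v ≤ 0x7E)
    lo := match s.lo with
          | none => some v
          | some l => some (if v < l then v else l)
    hi := match s.hi with
          | none => some v
          | some h => some (if h < v then v else h) }

def infer_constraint_alt (values : List Int) : Option String :=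
  let s := values.foldl icStep ⟨true, true, true, true, none, none⟩
  if s.allDigit then some "digit"
  else if s.allAlpha then some "alpha"
  else if s.allAlnum then some "alnum"
  else if s.allPrint then some "print"
  else
    match s.lo with
    | none => none
    | some lo =>
      match s.hi with
      | none => none
      | some hi =>
        if hi - lo < 64 then some ("range:" ++ PySem.Int.toStr lo ++ "-" ++ PySem.Int.toStr hi)
        else none

-- ===== PRECONDITION & SPEC =====
def Spec_infer_constraint (values : List Int) (out : Option String) : Prop := out = infer_constraint_alt values
instance (values : List Int) (out : Option String) : Decidable (Spec_infer_constraint values out) := by unfold Spec_infer_constraint; infer_instance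

-- ===== CLAIM (what is proved, stated in full; the proofs are below) =====
def Claim_equal_infer_constraint : Prop := ∀ (values : List Int), Dom_infer_constraint values → Spec_infer_constraint values (infer_constraint values)

-- ===== LEMMAS AND PROOFS =====

theorem icFold_eq (t : List Int) (s : IcState) :
    t.foldl icStep s =
      { allDigit := s.allDigit && t.all (fun v => decide (0x30 ≤ v ∧ v ≤ 0x39))
        allAlpha := s.allAlpha && t.all (fun v => decide ((0x41 ≤ v ∧ v ≤ 0x5A) ∨ (0x61 ≤ v ∧ v ≤ 0x7A)))
        allAlnum := s.allAlnum && t.all (fun v => decide ((0x41 ≤ v ∧ v ≤ 0x5A) ∨ (0x61 ≤ v ∧ v ≤ 0x7A) ∨ (0x30 ≤ v ∧ v ≤ 0x39)))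
        allPrint := s.allPrint && t.all (fun v => decide (0x20 ≤ v ∧ v ≤ 0x7E))
        lo := match s.lo with
              | none => PySem.List.min? t (fun y => y)
              | some l => some (t.foldl min l)
        hi := match s.hi with
              | none => PySem.List.max? t (fun y => y)
              | some h => some (t.foldl max h) } := by
  induction t generalizing s with
  | nil =>
    cases s with
    | mk d a n p lo hi =>
      cases lo <;> cases hi <;>
        simp [PySem.List.min?, PySem.List.max?]
  | cons x t ih =>
    rw [List.foldl_cons, ih]
    cases s with
    | mk d a n p lo hi =>
      cases lo <;> cases hi <;>
        simp [icStep, PySem.List.min?_id_cons, PySem.List.max?_id_cons,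
              Bool.and_assoc, min_def, max_def] <;>
        (try constructor) <;>
        · congr 1
          split_ifs <;> omega

-- ===== VERDICT (by name: the statement is the Claim_ definition above) =====
theorem infer_constraint_spec : Claim_equal_infer_constraint := by
  intro values _
  unfold Spec_infer_constraint infer_constraint infer_constraint_alt
  rw [icFold_eq]
  cases values with
  | nil => rfl
  | cons x t =>
    simp only [Bool.true_and, PySem.List.min?_id_cons, PySem.List.max?_id_cons]
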